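-- pv_equiv track=rewrite | github.com/Rafael-Carriel/teste | 1.py | basicaNaoBasica
-- ===== SOURCE A (Python) =====
-- def basicaNaoBasica(objetivo,matrizA):
--     custobasico = [i for i in objetivo if i == 0]
--     custonaobasico = [i for i in objetivo if i != 0]
--     naobasica = [[linha[i] for i in range(len(linha)) if objetivo[i] != 0] for linha in matrizA]
--     basica = []
--     for j in range(len(objetivo)):
--         if objetivo[j] == 0:
--             basica.append([matrizA[i][j] for i in range(len(matrizA))])
--     return custobasico, custonaobasico, basica, naobasica
-- ===== SOURCE B (Python) =====
-- def basicaNaoBasica(objetivo, matrizA):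
--     # Row-major single pass: accumulate basica columns and naobasica rows together.
--     zeros = [j for j, c in enumerate(objetivo) if c == 0]
--     basica = [[] for _ in zeros]
--     naobasica = []
--     for linha in matrizA:
--         basica = [acc + [linha[j]] for acc, j in zip(basica, zeros)]
--         naobasica.append([x for i, x in enumerate(linha) if objetivo[i] != 0])
--     custobasico = [0] * len(zeros)
--     custonaobasico = [c for c in objetivo if c != 0]
--     return custobasico, custonaobasico, basica, naobasica
-- ===== Notes on version B (the rewrite author's own statement) =====
-- stated objective: alternative
-- what changed: Replaces A's column-major extraction of basica (a scan over objetivo indices with an inner pass over all rows per zero column) by one row-major pass that extends per-zero-column accumulators and builds each naobasica row as it goes; custobasico becomes [0]*len(zeros) since its entries are exactly the zeros.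
import Mathlib
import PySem

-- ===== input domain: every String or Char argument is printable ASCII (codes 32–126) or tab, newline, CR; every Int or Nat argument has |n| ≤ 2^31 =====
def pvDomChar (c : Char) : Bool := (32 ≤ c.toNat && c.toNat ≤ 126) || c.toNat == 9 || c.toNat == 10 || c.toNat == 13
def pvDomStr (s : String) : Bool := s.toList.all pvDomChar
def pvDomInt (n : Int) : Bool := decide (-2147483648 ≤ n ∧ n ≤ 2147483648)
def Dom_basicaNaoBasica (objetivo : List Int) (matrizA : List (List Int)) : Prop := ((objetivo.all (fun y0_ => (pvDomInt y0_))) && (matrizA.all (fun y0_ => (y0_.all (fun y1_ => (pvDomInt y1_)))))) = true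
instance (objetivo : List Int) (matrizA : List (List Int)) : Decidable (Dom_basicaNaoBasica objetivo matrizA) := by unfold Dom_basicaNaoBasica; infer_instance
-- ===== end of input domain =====

-- B makes one row-major pass that grows per-zero-column accumulators instead of A's
-- column-major per-zero-column scans over all rows (objective: alternative decomposition).

-- ===== PORT A =====
def basicaNaoBasica (objetivo : List Int) (matrizA : List (List Int)) : List Int × List Int × List (List Int) × List (List Int) :=
  let custobasico := objetivo.filter (fun i => i == 0)
  let custonaobasico := objetivo.filter (fun i => !(i == 0))
  let naobasica := matrizA.map (fun linha =>
    ((PySem.List.pyRange 0 (linha.length : Int) 1).filter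
        (fun i => !(PySem.List.pyGetD objetivo i 0 == 0))).map
      (fun i => PySem.List.pyGetD linha i 0))
  let basica := (PySem.List.pyRange 0 (objetivo.length : Int) 1).foldl (fun acc j =>
    if PySem.List.pyGetD objetivo j 0 == 0 then
      acc ++ [(PySem.List.pyRange 0 (matrizA.length : Int) 1).map
        (fun i => PySem.List.pyGetD (PySem.List.pyGetD matrizA i []) j 0)]
    else acc) []
  (custobasico, custonaobasico, basica, naobasica)

-- ===== PORT B =====
def basicaNaoBasica_alt (objetivo : List Int) (matrizA : List (List Int)) : List Int × List Int × List (List Int) × List (List Int) :=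
  let zeros := ((PySem.List.enumerate objetivo 0).filter (fun p => p.2 == 0)).map Prod.fst
  let final := matrizA.foldl (fun st linha =>
      ((st.1.zip zeros).map (fun p => p.1 ++ [PySem.List.pyGetD linha p.2 0]),
       st.2 ++ [((PySem.List.enumerate linha 0).filter
          (fun p => !(PySem.List.pyGetD objetivo p.1 0 == 0))).map Prod.snd]))
    (zeros.map (fun _ => ([] : List Int)), ([] : List (List Int)))
  (List.replicate zeros.length 0, objetivo.filter (fun c => !(c == 0)), final.1, final.2)

-- ===== PRECONDITION & SPEC =====
-- Pre_ excludes exactly the inputs where Python A raises IndexError: a row longer than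
-- objetivo (objetivo[i] out of range in naobasica) or a zero column index reaching past
-- some row's end (matrizA[i][j] out of range in basica).
def Pre_basicaNaoBasica (objetivo : List Int) (matrizA : List (List Int)) : Prop :=
  ∀ linha ∈ matrizA, linha.length ≤ objetivo.length ∧
    ∀ j < objetivo.length, objetivo.getD j 0 = 0 → j < linha.length
instance (objetivo : List Int) (matrizA : List (List Int)) : Decidable (Pre_basicaNaoBasica objetivo matrizA) := by unfold Pre_basicaNaoBasica; infer_instance
def pvWitness_basicaNaoBasica : List Int × List (List Int) := ([0, 2, 0], [[1, 2, 3], [4, 5, 6]])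

def Spec_basicaNaoBasica (objetivo : List Int) (matrizA : List (List Int)) (out : List Int × List Int × List (List Int) × List (List Int)) : Prop := out = basicaNaoBasica_alt objetivo matrizA
instance (objetivo : List Int) (matrizA : List (List Int)) (out : List Int × List Int × List (List Int) × List (List Int)) : Decidable (Spec_basicaNaoBasica objetivo matrizA out) := by unfold Spec_basicaNaoBasica; infer_instance

-- ===== CLAIM (what is proved, stated in full; the proofs are below) =====
def Claim_equal_basicaNaoBasica : Prop := ∀ (objetivo : List Int) (matrizA : List (List Int)), Dom_basicaNaoBasica objetivo matrizA → Pre_basicaNaoBasica objetivo matrizA → Spec_basicaNaoBasica objetivo matrizA (basicaNaoBasica objetivo matrizA)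

-- ===== LEMMAS AND PROOFS =====

-- A's enumerate-comprehensions, read through enumerate_eq_map_pyRange, become A's range forms.
theorem pv_enum_filter_map {α β : Type} (l : List α) (d : α) (p : Int → α → Bool) (f : Int × α → β) :
    ((PySem.List.enumerate l 0).filter (fun q => p q.1 q.2)).map f
      = ((PySem.List.pyRange 0 (l.length : Int) 1).filter
          (fun j => p j (PySem.List.pyGetD l j d))).map (fun j => f (j, PySem.List.pyGetD l j d)) := by
  rw [PySem.List.enumerate_eq_map_pyRange (d := d), List.filter_map, List.map_map]
  rfl

-- (l.map f).zip l pairs each x with f x.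
theorem pv_zip_map_self {α β : Type} (l : List α) (f : α → β) :
    (l.map f).zip l = l.map (fun x => (f x, x)) := by
  induction l with
  | nil => rfl
  | cons x xs ih => simp [ih]

-- Invariant of B's row-major accumulation of basica.
theorem pv_basica_fold (rows : List (List Int)) (zs : List Int) (f : Int → List Int) :
    rows.foldl (fun b linha => (b.zip zs).map (fun p => p.1 ++ [PySem.List.pyGetD linha p.2 0]))
        (zs.map f)
      = zs.map (fun j => f j ++ rows.map (fun r => PySem.List.pyGetD r j 0)) := by
  induction rows generalizing f with
  | nil => simp
  | cons r rs ih =>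
      simp only [List.foldl_cons, pv_zip_map_self, List.map_map]
      rw [show ((fun p : List Int × Int => p.1 ++ [PySem.List.pyGetD r p.2 0]) ∘
            fun x => (f x, x)) = fun j => f j ++ [PySem.List.pyGetD r j 0] from rfl]
      rw [ih (fun j => f j ++ [PySem.List.pyGetD r j 0])]
      simp

-- Every element of objetivo.filter (· == 0) is 0, so that filter is a replicate of its length.
theorem pv_filter_zero_replicate (l : List Int) :
    l.filter (fun c => c == 0) = List.replicate (l.filter (fun c => c == 0)).length 0 := by
  induction l with
  | nil => rfl
  | cons x xs ih =>
      by_cases h : x = 0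
      · subst h; simpa [List.filter_cons, List.replicate_succ] using ih
      · simpa [List.filter_cons, h] using ih

theorem basicaNaoBasica_spec : Claim_equal_basicaNaoBasica := by
  intro objetivo matrizA _hDom _hPre
  show basicaNaoBasica objetivo matrizA = basicaNaoBasica_alt objetivo matrizA
  unfold basicaNaoBasica basicaNaoBasica_alt
  simp only
  -- normalize B's zeros to A's range-filter form
  have hzeros :
      ((PySem.List.enumerate objetivo 0).filter (fun p => p.2 == 0)).map Prod.fst
        = (PySem.List.pyRange 0 (objetivo.length : Int) 1).filter
            (fun j => PySem.List.pyGetD objetivo j 0 == 0) := by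
    rw [pv_enum_filter_map objetivo 0 (fun _ v => v == 0) Prod.fst]
    simp
  rw [hzeros]
  set Z := (PySem.List.pyRange 0 (objetivo.length : Int) 1).filter
      (fun j => PySem.List.pyGetD objetivo j 0 == 0) with hZ
  have hsplit := PySem.List.foldl_prod_mk
    (fun (b : List (List Int)) (linha : List Int) =>
      (b.zip Z).map (fun p => p.1 ++ [PySem.List.pyGetD linha p.2 0]))
    (fun (acc : List (List Int)) (linha : List Int) =>
      acc ++ [((PySem.List.enumerate linha 0).filter
        (fun p => !(PySem.List.pyGetD objetivo p.1 0 == 0))).map Prod.snd])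
    matrizA (Z.map (fun _ => ([] : List Int))) ([] : List (List Int))
  rw [hsplit]
  simp only [Prod.mk.injEq]
  refine ⟨?_, trivial, ?_, ?_⟩
  · -- custobasico = replicate of the number of zero columns
    have key : objetivo.filter (fun c : Int => c == 0)
        = ((PySem.List.pyRange 0 (objetivo.length : Int) 1).filter
            (fun j => PySem.List.pyGetD objetivo j 0 == 0)).map
              (fun j => PySem.List.pyGetD objetivo j 0) := by
      have h1 : objetivo.filter (fun c : Int => c == 0)
          = ((PySem.List.enumerate objetivo 0).filter (fun q => q.2 == 0)).map Prod.snd := by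
        conv_lhs => rw [← PySem.List.map_snd_enumerate objetivo 0]
        rw [List.filter_map]
        rfl
      rw [h1, pv_enum_filter_map objetivo 0 (fun _ v => v == 0) Prod.snd]
    rw [pv_filter_zero_replicate objetivo]
    congr 1
    rw [key, List.length_map, hZ]
  · -- basica
    rw [pv_basica_fold matrizA _ (fun _ => [])]
    rw [PySem.List.foldl_append_if]
    simp only [List.nil_append]
    apply List.map_congr_left
    intro j _
    have hcol : (PySem.List.pyRange 0 (matrizA.length : Int) 1).map
          (fun i => PySem.List.pyGetD (PySem.List.pyGetD matrizA i ([] : List Int)) j 0)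
        = ((PySem.List.pyRange 0 (matrizA.length : Int) 1).map
            (fun i => PySem.List.pyGetD matrizA i ([] : List Int))).map
              (fun r => PySem.List.pyGetD r j 0) := by
      rw [List.map_map]
      rfl
    rw [hcol, PySem.List.map_pyGetD_pyRange_zero']
  · -- naobasica
    rw [PySem.List.foldl_append_singleton_eq_map]
    simp only [List.nil_append]
    refine (List.map_congr_left ?_).symm
    intro linha _
    rw [pv_enum_filter_map linha 0 (fun j _ => !(PySem.List.pyGetD objetivo j 0 == 0)) Prod.snd]
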